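-- pv_equiv track=rewrite | github.com/rezkidsl/ekg | AFPreprocessing.py | signal_squared
-- ===== SOURCE A (Python) =====
-- def signal_squared(raw_signal):
--     diff1 = []
--     for i in range(len(raw_signal)-1):
--         diff1.append(raw_signal[i+1] - raw_signal[i])
--     diff2 = []
--     for i in range(len(diff1)-1):
--         diff2.append(diff1[i + 1] - diff1[i])
--     result_squared = []
--     for i in range(len(diff2)):
--         result_squared.append(diff2[i] * diff2[i])
--     return result_squared
-- ===== SOURCE B (Python) =====
-- def signal_squared(raw_signal):
--     return [(c - 2 * b + a) ** 2
--             for a, b, c in zip(raw_signal, raw_signal[1:], raw_signal[2:])]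
-- ===== Notes on version B (the rewrite author's own statement) =====
-- stated objective: simpler
-- what changed: Replaces three sequential index loops building diff1/diff2/result lists with a single comprehension over zipped windows of the signal, computing each squared second difference (c - 2b + a)^2 directly.
import Mathlib
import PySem

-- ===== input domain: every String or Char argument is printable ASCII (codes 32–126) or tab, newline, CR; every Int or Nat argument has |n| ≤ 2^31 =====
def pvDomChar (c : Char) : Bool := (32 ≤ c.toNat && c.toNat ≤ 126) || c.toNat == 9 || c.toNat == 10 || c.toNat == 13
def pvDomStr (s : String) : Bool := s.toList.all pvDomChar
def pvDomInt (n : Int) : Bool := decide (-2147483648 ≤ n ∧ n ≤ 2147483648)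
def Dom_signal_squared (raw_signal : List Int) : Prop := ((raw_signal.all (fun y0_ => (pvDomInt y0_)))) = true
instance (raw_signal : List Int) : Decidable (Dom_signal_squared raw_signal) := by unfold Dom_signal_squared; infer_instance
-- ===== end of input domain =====

-- B replaces A's three sequential index loops (diff1, diff2, squares) by one map over
-- zipped length-3 windows of the signal, computing (c - 2b + a)^2 directly (objective: simpler).

-- ===== PORT A =====
-- literal transliteration of A: three index loops appending to an accumulator list
def signal_squared (raw_signal : List Int) : List Int :=
  let diff1 := (PySem.List.pyRange 0 ((raw_signal.length : Int) - 1) 1).foldl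
    (fun acc i => acc ++ [PySem.List.pyGetD raw_signal (i + 1) 0 - PySem.List.pyGetD raw_signal i 0]) []
  let diff2 := (PySem.List.pyRange 0 ((diff1.length : Int) - 1) 1).foldl
    (fun acc i => acc ++ [PySem.List.pyGetD diff1 (i + 1) 0 - PySem.List.pyGetD diff1 i 0]) []
  (PySem.List.pyRange 0 (diff2.length : Int) 1).foldl
    (fun acc i => acc ++ [PySem.List.pyGetD diff2 i 0 * PySem.List.pyGetD diff2 i 0]) []

-- ===== PORT B =====
-- literal transliteration of B: map over zip(s, s[1:], s[2:])
def signal_squared_alt (raw_signal : List Int) : List Int :=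
  (raw_signal.zip ((raw_signal.drop 1).zip (raw_signal.drop 2))).map
    (fun p => (p.2.2 - 2 * p.2.1 + p.1) ^ 2)

-- ===== PRECONDITION & SPEC =====
def Spec_signal_squared (raw_signal : List Int) (out : List Int) : Prop := out = signal_squared_alt raw_signal
instance (raw_signal : List Int) (out : List Int) : Decidable (Spec_signal_squared raw_signal out) := by unfold Spec_signal_squared; infer_instance

-- ===== CLAIM (what is proved, stated in full; the proofs are below) =====
def Claim_equal_signal_squared : Prop := ∀ (raw_signal : List Int), Dom_signal_squared raw_signal → Spec_signal_squared raw_signal (signal_squared raw_signal)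

-- ===== LEMMAS AND PROOFS =====

-- adjacent differences, as A's first two loops compute them
def pvDL (s : List Int) : List Int :=
  (List.range (s.length - 1)).map (fun k => s.getD (k + 1) 0 - s.getD k 0)

lemma pvDL_single (a : Int) : pvDL [a] = [] := rfl

lemma pvDL_cons (a b : Int) (t : List Int) :
    pvDL (a :: b :: t) = (b - a) :: pvDL (b :: t) := by
  simp [pvDL, List.range_succ_eq_map, List.map_map, Function.comp, Nat.succ_eq_add_one]

-- A's diff loop equals pvDL
lemma loop_eq_pvDL (s : List Int) :
    (PySem.List.pyRange 0 ((s.length : Int) - 1) 1).foldl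
      (fun acc i => acc ++ [PySem.List.pyGetD s (i + 1) 0 - PySem.List.pyGetD s i 0]) []
    = pvDL s := by
  rw [PySem.List.foldl_append_singleton_eq_map, PySem.List.pyRange_one]
  simp only [List.nil_append, List.map_map, pvDL]
  have hlen : ((s.length : Int) - 1 - 0).toNat = s.length - 1 := by omega
  rw [hlen]
  apply List.map_congr_left
  intro k _
  have h0 : (0 : Int) + (k : Int) = ((k : Nat) : Int) := by omega
  have h1 : (k : Int) + 1 = ((k + 1 : Nat) : Int) := by omega
  simp only [Function.comp_apply, h0, h1, PySem.List.pyGetD_natCast]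

-- A's third loop squares each element
lemma loop_sq (d : List Int) :
    (PySem.List.pyRange 0 (d.length : Int) 1).foldl
      (fun acc i => acc ++ [PySem.List.pyGetD d i 0 * PySem.List.pyGetD d i 0]) []
    = d.map (fun x => x * x) := by
  rw [PySem.List.foldl_append_singleton_eq_map]
  have h : (PySem.List.pyRange 0 (d.length : Int) 1).map
        (fun i => PySem.List.pyGetD d i 0 * PySem.List.pyGetD d i 0)
      = ((PySem.List.pyRange 0 (d.length : Int) 1).map
          (fun i => PySem.List.pyGetD d i 0)).map (fun x => x * x) := by
    simp [List.map_map]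
  rw [List.nil_append, h, PySem.List.map_pyGetD_pyRange_zero']

lemma A_eq (s : List Int) :
    signal_squared s = (pvDL (pvDL s)).map (fun x => x * x) := by
  unfold signal_squared
  simp only [loop_eq_pvDL, loop_sq]

lemma main_eq (s : List Int) :
    (pvDL (pvDL s)).map (fun x => x * x) = signal_squared_alt s := by
  match s with
  | [] => rfl
  | [a] => rfl
  | [a, b] => simp [pvDL_cons, pvDL_single, signal_squared_alt]
  | a :: b :: c :: t =>
    have ih := main_eq (b :: c :: t)
    rw [pvDL_cons, pvDL_cons, pvDL_cons]
    rw [pvDL_cons b c t] at ih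
    simp only [List.map_cons, ih]
    have halt : signal_squared_alt (a :: b :: c :: t)
        = (c - 2 * b + a) ^ 2 :: signal_squared_alt (b :: c :: t) := by
      simp [signal_squared_alt, List.zip_cons_cons]
    rw [halt]
    congr 1
    ring
termination_by s.length

-- ===== VERDICT (by name: the statement is the Claim_ definition above) =====
theorem signal_squared_spec : Claim_equal_signal_squared := by
  intro s _
  unfold Spec_signal_squared
  rw [A_eq, main_eq]
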